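-- pv_equiv track=rewrite | github.com/droe-lang/droe | compiler/parser.py | _find_operator_outside_quotes
-- ===== SOURCE A (Python) =====
-- def _find_operator_outside_quotes(expr_str: str, operator: str) -> int:
--     """Find the position of an operator that's not inside quoted strings."""
--     i = 0
--     while i < len(expr_str):
--         if expr_str[i:i+len(operator)] == operator:
--             # Check if we're inside quotes
--             quote_count_single = expr_str[:i].count("'") - expr_str[:i].count("\\'")
--             quote_count_double = expr_str[:i].count('"') - expr_str[:i].count('\\"')
--
--             # If we have an even number of quotes (or zero), we're outside quotes
--             if quote_count_single % 2 == 0 and quote_count_double % 2 == 0: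
--                 return i
--         i += 1
--     return -1
-- ===== SOURCE B (Python) =====
-- def _find_operator_outside_quotes(expr_str: str, operator: str) -> int:
--     """Single left-to-right pass keeping running quote parities instead of
--     recounting the prefix at every candidate position."""
--     m = len(operator)
--     single = 0
--     double = 0
--     for i, c in enumerate(expr_str):
--         if single % 2 == 0 and double % 2 == 0 and expr_str[i:i+m] == operator:
--             return i
--         if not (i > 0 and expr_str[i-1] == '\\'):
--             if c == "'":
--                 single += 1
--             elif c == '"':
--                 double += 1
--     return -1
-- ===== Notes on version B (the rewrite author's own statement) =====
-- stated objective: alternative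
-- what changed: Instead of recounting quotes and escaped quotes in the whole prefix expr_str[:i] at every candidate match, B maintains running counts of unescaped single and double quotes in a single left-to-right pass.
import Mathlib
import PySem

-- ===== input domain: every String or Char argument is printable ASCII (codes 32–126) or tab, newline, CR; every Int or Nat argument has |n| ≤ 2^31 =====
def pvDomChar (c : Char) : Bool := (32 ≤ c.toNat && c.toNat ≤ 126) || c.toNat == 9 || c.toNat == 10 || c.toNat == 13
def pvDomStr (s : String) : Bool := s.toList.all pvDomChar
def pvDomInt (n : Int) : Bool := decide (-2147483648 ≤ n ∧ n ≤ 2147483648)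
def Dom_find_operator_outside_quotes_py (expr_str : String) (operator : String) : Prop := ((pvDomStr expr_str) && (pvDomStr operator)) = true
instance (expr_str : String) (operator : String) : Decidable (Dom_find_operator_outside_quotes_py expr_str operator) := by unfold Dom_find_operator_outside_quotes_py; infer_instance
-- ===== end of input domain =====

-- B replaces A's per-candidate recount of quotes in the whole prefix expr_str[:i]
-- with running quote parities maintained in a single left-to-right pass (objective: alternative).

-- ===== PORT A =====
-- while-loop of A: index i, each candidate recounts quotes in expr_str[:i]
def pvALoop (s op : List Char) (i : Nat) : Int :=
  if i < s.length then
    if PySem.List.slice s (some (i : Int)) (some ((i : Int) + (op.length : Int))) = op then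
      let quote_count_single : Int :=
        (PySem.Chars.count (PySem.List.slice s none (some (i : Int))) ['\''] : Int)
          - (PySem.Chars.count (PySem.List.slice s none (some (i : Int))) ['\\', '\''] : Int)
      let quote_count_double : Int :=
        (PySem.Chars.count (PySem.List.slice s none (some (i : Int))) ['"'] : Int)
          - (PySem.Chars.count (PySem.List.slice s none (some (i : Int))) ['\\', '"'] : Int)
      if PySem.Int.mod quote_count_single 2 = 0 ∧ PySem.Int.mod quote_count_double 2 = 0 then
        (i : Int)
      else pvALoop s op (i + 1)
    else pvALoop s op (i + 1)
  else -1
termination_by s.length - i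

def find_operator_outside_quotes_py (expr_str : String) (operator : String) : Int :=
  pvALoop expr_str.toList operator.toList 0

-- ===== PORT B =====
-- single pass of B: running counters `single`, `double` of unescaped quotes seen so far
def pvBLoop (s op : List Char) (i : Nat) (single double : Int) : Int :=
  if h : i < s.length then
    if PySem.Int.mod single 2 = 0 ∧ PySem.Int.mod double 2 = 0 ∧
        PySem.List.slice s (some (i : Int)) (some ((i : Int) + (op.length : Int))) = op then
      (i : Int)
    else
      let c := s[i]
      if ¬ (0 < i ∧ s[i-1]? = some '\\') then
        if c = '\'' then pvBLoop s op (i + 1) (single + 1) double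
        else if c = '"' then pvBLoop s op (i + 1) single (double + 1)
        else pvBLoop s op (i + 1) single double
      else pvBLoop s op (i + 1) single double
  else -1
termination_by s.length - i

def find_operator_outside_quotes_py_alt (expr_str : String) (operator : String) : Int :=
  pvBLoop expr_str.toList operator.toList 0 0 0

-- ===== PRECONDITION & SPEC =====
def Spec_find_operator_outside_quotes_py (expr_str : String) (operator : String) (out : Int) : Prop := out = find_operator_outside_quotes_py_alt expr_str operator
instance (expr_str : String) (operator : String) (out : Int) : Decidable (Spec_find_operator_outside_quotes_py expr_str operator out) := by unfold Spec_find_operator_outside_quotes_py; infer_instance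

-- ===== CLAIM (what is proved, stated in full; the proofs are below) =====
def Claim_equal_find_operator_outside_quotes_py : Prop := ∀ (expr_str : String) (operator : String), Dom_find_operator_outside_quotes_py expr_str operator → Spec_find_operator_outside_quotes_py expr_str operator (find_operator_outside_quotes_py expr_str operator)

-- ===== LEMMAS AND PROOFS =====

-- number of adjacent (e, q) pairs in a list (= Python's count of the 2-char pattern when e ≠ q)
def pvPairs (e q : Char) : List Char → Nat
  | a :: b :: r => (if a = e ∧ b = q then 1 else 0) + pvPairs e q (b :: r)
  | _ => 0

theorem pvCount_go_singleton (q : Char) (fuel : Nat) :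
    ∀ (l : List Char) (acc : Nat), l.length ≤ fuel →
      PySem.Chars.count.go [q] fuel l acc = acc + l.count q := by
  induction fuel with
  | zero =>
    intro l acc h
    have : l = [] := by cases l <;> simp_all
    subst this; simp [PySem.Chars.count.go]
  | succ n ih =>
    intro l acc h
    cases l with
    | nil => simp [PySem.Chars.count.go]
    | cons a t =>
      have ht : t.length ≤ n := by simp at h; omega
      rw [PySem.Chars.count.go]
      by_cases hm : ([q] : List Char).isPrefixOf (a :: t)
      · have ha : a = q := by simp [List.isPrefixOf] at hm; exact hm.symm
        rw [if_pos hm]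
        simp only [List.length_cons, List.length_nil, List.drop_succ_cons, List.drop_zero]
        rw [ih t (acc + 1) ht, List.count_cons, ha]
        simp
        omega
      · have ha : ¬ a = q := by
          intro hq; exact hm (by simp [List.isPrefixOf, hq])
        rw [if_neg hm, ih t acc ht, List.count_cons]
        simp
        exact ha

theorem pvPairs_cons_ne (e q : Char) (hne : e ≠ q) (t : List Char) :
    pvPairs e q (q :: t) = pvPairs e q t := by
  cases t with
  | nil => simp [pvPairs]
  | cons b r =>
    simp only [pvPairs]
    rw [if_neg (by rintro ⟨h1, _⟩; exact hne h1.symm)]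
    omega

theorem pvCount_go_pair (e q : Char) (hne : e ≠ q) (fuel : Nat) :
    ∀ (l : List Char) (acc : Nat), l.length ≤ fuel →
      PySem.Chars.count.go [e, q] fuel l acc = acc + pvPairs e q l := by
  induction fuel with
  | zero =>
    intro l acc h
    have : l = [] := by cases l <;> simp_all
    subst this; simp [PySem.Chars.count.go, pvPairs]
  | succ n ih =>
    intro l acc h
    cases l with
    | nil => simp [PySem.Chars.count.go, pvPairs]
    | cons a t =>
      rw [PySem.Chars.count.go]
      by_cases hm : ([e, q] : List Char).isPrefixOf (a :: t)
      · match t, hm, h with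
        | [], hm, _ => simp [List.isPrefixOf] at hm
        | b :: r, hm, h =>
          have hab : a = e ∧ b = q := by
            have := hm; simp [List.isPrefixOf] at this; tauto
          rw [if_pos hm]
          simp only [List.length_cons, List.length_nil, List.drop_succ_cons, List.drop_zero]
          rw [ih r (acc + 1) (by simp at h; omega), hab.1, hab.2]
          rw [show pvPairs e q (e :: q :: r) = 1 + pvPairs e q (q :: r) from by simp [pvPairs]]
          rw [pvPairs_cons_ne e q hne]
          omega
      · rw [if_neg hm, ih t acc (by simp at h; omega)]
        have : pvPairs e q (a :: t) = pvPairs e q t := by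
          cases t with
          | nil => simp [pvPairs]
          | cons b r =>
            have hnab : ¬ (a = e ∧ b = q) := by
              rintro ⟨h1, h2⟩
              exact hm (by simp [List.isPrefixOf, h1, h2])
            simp [pvPairs, hnab]
        omega

theorem pvCount_singleton (q : Char) (l : List Char) :
    PySem.Chars.count l [q] = l.count q := by
  rw [PySem.Chars.count, if_neg (by simp)]
  rw [pvCount_go_singleton q l.length l 0 (le_refl _)]
  omega

theorem pvCount_pair (e q : Char) (hne : e ≠ q) (l : List Char) :
    PySem.Chars.count l [e, q] = pvPairs e q l := by
  rw [PySem.Chars.count, if_neg (by simp)]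
  rw [pvCount_go_pair e q hne l.length l 0 (le_refl _)]
  omega

-- step lemmas for the running counters
theorem pvCount_take_succ (s : List Char) (i : Nat) (h : i < s.length) (q : Char) :
    (s.take (i+1)).count q = (s.take i).count q + (if s[i] = q then 1 else 0) := by
  rw [List.take_succ, List.getElem?_eq_getElem h]
  rw [Option.toList_some, List.count_append]
  congr 1
  rw [List.count_singleton]
  by_cases hq : s[i] = q
  · simp [hq]
  · simp [hq, fun h' : q = s[i] => hq h'.symm]

theorem pvPairs_append_singleton (e q : Char) (xs : List Char) (c : Char) :
    pvPairs e q (xs ++ [c]) =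
      pvPairs e q xs + (if xs.getLast? = some e ∧ c = q then 1 else 0) := by
  induction xs with
  | nil => simp [pvPairs]
  | cons a t ih =>
    cases t with
    | nil => simp [pvPairs]
    | cons b r =>
      have hlast : (a :: b :: r).getLast? = (b :: r).getLast? := by simp
      rw [show (a :: b :: r) ++ [c] = a :: ((b :: r) ++ [c]) from rfl]
      rw [show ((b :: r) : List Char) ++ [c] = b :: (r ++ [c]) from rfl] at ih ⊢
      simp only [pvPairs] at ih ⊢
      rw [hlast]
      omega

theorem pvPairs_take_succ (s : List Char) (i : Nat) (h : i < s.length) (e q : Char) :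
    pvPairs e q (s.take (i+1)) =
      pvPairs e q (s.take i) + (if 0 < i ∧ s[i-1]? = some e ∧ s[i] = q then 1 else 0) := by
  rw [List.take_succ, List.getElem?_eq_getElem h]
  simp only [Option.toList_some]
  rw [pvPairs_append_singleton]
  congr 1
  rcases Nat.eq_zero_or_pos i with hi | hi
  · subst hi; simp
  · have h1 : i - 1 < i := by omega
    have hlast : (s.take i).getLast? = s[i-1]? := by
      rw [List.getLast?_eq_getElem?, List.length_take, Nat.min_eq_left h.le]
      exact List.getElem?_take_of_lt h1
    rw [hlast]
    by_cases he : s[i-1]? = some e <;> simp [he, hi]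

-- one loop step: B's branch on the current char updates the counters to the take-(i+1) recount
theorem pvStepFinish (s op : List Char) (i : Nat) (h : i < s.length) (cs cd : Int)
    (hcs : cs = ((s.take i).count '\'' : Int) - (pvPairs '\\' '\'' (s.take i) : Int))
    (hcd : cd = ((s.take i).count '"' : Int) - (pvPairs '\\' '"' (s.take i) : Int))
    (hA : pvALoop s op (i+1) = pvBLoop s op (i+1)
        ((((s.take i).count '\'' + if s[i] = '\'' then 1 else 0 : Nat) : Int) -
         ((pvPairs '\\' '\'' (s.take i) + if 0 < i ∧ s[i-1]? = some '\\' ∧ s[i] = '\'' then 1 else 0 : Nat) : Int))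
        ((((s.take i).count '"' + if s[i] = '"' then 1 else 0 : Nat) : Int) -
         ((pvPairs '\\' '"' (s.take i) + if 0 < i ∧ s[i-1]? = some '\\' ∧ s[i] = '"' then 1 else 0 : Nat) : Int))) :
    pvALoop s op (i+1) =
      (let c := s[i]
       if ¬ (0 < i ∧ s[i-1]? = some '\\') then
         if c = '\'' then pvBLoop s op (i+1) (cs + 1) cd
         else if c = '"' then pvBLoop s op (i+1) cs (cd + 1)
         else pvBLoop s op (i+1) cs cd
       else pvBLoop s op (i+1) cs cd) := by
  rw [hA]
  by_cases hesc : 0 < i ∧ s[i-1]? = some '\\'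
  · simp only [hesc, not_true, if_neg (by tauto : ¬ ¬ (0 < i ∧ s[i-1]? = some '\\'))]
    congr 1
    · rw [hcs]; by_cases hq : s[i] = '\'' <;> simp [hq, hesc]
    · rw [hcd]; by_cases hq : s[i] = '"' <;> simp [hq, hesc]
  · simp only [if_pos hesc]
    by_cases h1 : s[i] = '\''
    · have h2 : ¬ s[i] = '"' := by rw [h1]; decide
      simp only [h1, h2, if_true, if_false]
      congr 1
      · rw [hcs]; simp [h1, hesc]; omega
      · rw [hcd]; simp [h2, fun hc : 0 < i ∧ s[i-1]? = some '\\' ∧ s[i] = '"' => hesc ⟨hc.1, hc.2.1⟩]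
    · by_cases h2 : s[i] = '"'
      · simp only [h1, h2, if_false, if_true]
        congr 1
        · rw [hcs]; simp [h1, fun hc : 0 < i ∧ s[i-1]? = some '\\' ∧ s[i] = '\'' => hesc ⟨hc.1, hc.2.1⟩]
        · rw [hcd]; simp [h2, hesc]; omega
      · simp only [h1, h2, if_false]
        congr 1
        · rw [hcs]; simp [h1, fun hc : 0 < i ∧ s[i-1]? = some '\\' ∧ s[i] = '\'' => hesc ⟨hc.1, hc.2.1⟩]
        · rw [hcd]; simp [h2, fun hc : 0 < i ∧ s[i-1]? = some '\\' ∧ s[i] = '"' => hesc ⟨hc.1, hc.2.1⟩]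

-- the loop invariant: A's recount at position i equals B's running counters
theorem pvLoop_eq (s op : List Char) : ∀ (k i : Nat), k = s.length - i →
    pvALoop s op i =
      pvBLoop s op i
        (((s.take i).count '\'' : Int) - (pvPairs '\\' '\'' (s.take i) : Int))
        (((s.take i).count '"' : Int) - (pvPairs '\\' '"' (s.take i) : Int)) := by
  intro k
  induction k with
  | zero =>
    intro i hk
    have h : ¬ i < s.length := by omega
    rw [pvALoop, pvBLoop]
    simp [h]
  | succ n ih =>
    intro i hk
    have h : i < s.length := by omega
    have hA := ih (i + 1) (by omega)
    rw [pvCount_take_succ s i h, pvCount_take_succ s i h,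
        pvPairs_take_succ s i h, pvPairs_take_succ s i h] at hA
    rw [pvALoop, pvBLoop]
    rw [PySem.List.slice_to s (by positivity : (0:Int) ≤ (i:Int))]
    simp only [Int.toNat_natCast]
    simp only [pvCount_singleton,
        pvCount_pair '\\' '\'' (by decide), pvCount_pair '\\' '"' (by decide)]
    simp only [if_pos h, dif_pos h]
    set cs : Int := ((s.take i).count '\'' : Int) - (pvPairs '\\' '\'' (s.take i) : Int) with hcs
    set cd : Int := ((s.take i).count '"' : Int) - (pvPairs '\\' '"' (s.take i) : Int) with hcd
    by_cases hsl : PySem.List.slice s (some (i : Int)) (some ((i : Int) + (op.length : Int))) = op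
    · by_cases hev : PySem.Int.mod cs 2 = 0 ∧ PySem.Int.mod cd 2 = 0
      · rw [if_pos hsl, if_pos hev, if_pos ⟨hev.1, hev.2, hsl⟩]
      · have hnot : ¬ (PySem.Int.mod cs 2 = 0 ∧ PySem.Int.mod cd 2 = 0 ∧
            PySem.List.slice s (some (i : Int)) (some ((i : Int) + (op.length : Int))) = op) := by
          tauto
        rw [if_pos hsl, if_neg hev, if_neg hnot]
        exact pvStepFinish s op i h cs cd hcs hcd hA
    · have hnot : ¬ (PySem.Int.mod cs 2 = 0 ∧ PySem.Int.mod cd 2 = 0 ∧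
          PySem.List.slice s (some (i : Int)) (some ((i : Int) + (op.length : Int))) = op) := by
        tauto
      rw [if_neg hsl, if_neg hnot]
      exact pvStepFinish s op i h cs cd hcs hcd hA

-- ===== VERDICT (by name: the statement is the Claim_ definition above) =====
theorem find_operator_outside_quotes_py_spec : Claim_equal_find_operator_outside_quotes_py := by
  intro expr_str operator _
  unfold Spec_find_operator_outside_quotes_py find_operator_outside_quotes_py find_operator_outside_quotes_py_alt
  have := pvLoop_eq expr_str.toList operator.toList (expr_str.toList.length) 0 (by omega)
  simpa [pvPairs] using this
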